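-- pv_equiv track=rewrite | github.com/stevenshan/proposition-evaluator | Proposition Evaluator.py | remove_empty_parenthesis
-- ===== SOURCE A (Python) =====
-- def remove_empty_parenthesis(formula):
--     flag = True
--     while flag is True:
--         flag = False
--         start = -1
--         found = False
--         l = len(formula)
--         i = 0
--         while i < l:
--             unit = formula[i]
--             if unit == "(":
--                 start = i
--                 found = True
--             elif unit == ")" and found:
--                 found = False
--                 formula = formula[0:start] + formula[i + 1:]
--                 i = start - 1
--                 l = len(formula)
--                 flag = True
--             elif unit != " ":
--                 found = False
--             i += 1
--     return formula
-- ===== SOURCE B (Python) =====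
-- def remove_empty_parenthesis(formula):
--     # Single pass with a stack: each '(' records its output position and the
--     # enclosing frame's "all spaces so far" flag; a ')' seen while the current
--     # frame is all-spaces drops the whole group and restores the parent flag.
--     out = []
--     stack = []  # (position of '(' in out, parent clean flag)
--     clean = False
--     for c in formula:
--         if c == '(':
--             stack.append((len(out), clean))
--             out.append(c)
--             clean = True
--         elif c == ')' and stack and clean:
--             pos, clean = stack.pop()
--             del out[pos:]
--         else:
--             out.append(c)
--             if c != ' ':
--                 clean = False
--     return ''.join(out)
-- ===== Notes on version B (the rewrite author's own statement) =====
-- stated objective: faster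
-- what changed: A repeatedly rescans the whole string and splices out one space-only parenthesis group at a time until a full scan finds none; B makes a single left-to-right pass keeping a stack of open-parenthesis positions, each with a flag recording whether only spaces followed it, truncating the output buffer when such a clean group closes.
import Mathlib
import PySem

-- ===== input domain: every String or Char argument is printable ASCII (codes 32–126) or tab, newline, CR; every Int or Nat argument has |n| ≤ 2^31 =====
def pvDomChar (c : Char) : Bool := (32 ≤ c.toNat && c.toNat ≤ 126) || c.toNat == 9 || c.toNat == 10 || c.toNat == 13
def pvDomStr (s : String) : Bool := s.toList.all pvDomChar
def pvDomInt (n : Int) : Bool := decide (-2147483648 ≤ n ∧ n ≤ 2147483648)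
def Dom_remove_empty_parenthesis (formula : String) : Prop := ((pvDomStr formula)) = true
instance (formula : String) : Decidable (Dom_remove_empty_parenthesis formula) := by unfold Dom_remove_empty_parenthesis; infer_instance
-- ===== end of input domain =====

-- B replaces A's fixpoint loop of repeated rescans by one left-to-right pass
-- with a stack of open-parenthesis positions and an "all spaces since the
-- last '('" flag.


-- ===== PORT A =====

-- A's inner `while i < l` scan.  The `none` arm of `pyGet?` and the length
-- guard `hlen` are totality guards only: in every actual call 0 ≤ i < l =
-- f.length, and a removal cuts out a group of length ≥ 2, so both dead
-- branches are unreachable (established by the lemmas below).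
def innerA (f : List Char) (start : Int) (found : Bool) (l i : Int) (flag : Bool) :
    List Char × Bool :=
  if hi : i < l then
    match PySem.List.pyGet? f i with                -- unit = formula[i]
    | none => (f, flag)                             -- unreachable: i is in range
    | some unit =>
      if unit = '(' then
        innerA f i true l (i + 1) flag              -- start = i; found = True
      else if unit = ')' ∧ found = true then
        -- formula = formula[0:start] + formula[i+1:]; i = start - 1; then i += 1
        let f' := PySem.List.slice f (some 0) (some start) ++
                  PySem.List.slice f (some (i + 1)) none
        if hlen : f'.length < f.length then
          innerA f' start false (f'.length : Int) start true
        else (f, flag)                              -- unreachable totality guard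
      else if unit ≠ ' ' then
        innerA f start false l (i + 1) flag         -- found = False
      else
        innerA f start found l (i + 1) flag
  else (f, flag)
termination_by (f.length, (l - i).toNat)
decreasing_by
  · exact Prod.Lex.right _ ((Int.toNat_lt_toNat (Int.sub_pos.mpr hi)).mpr
      (sub_lt_sub_left (lt_add_one i) l))
  · exact Prod.Lex.left _ _ hlen
  · exact Prod.Lex.right _ ((Int.toNat_lt_toNat (Int.sub_pos.mpr hi)).mpr
      (sub_lt_sub_left (lt_add_one i) l))
  · exact Prod.Lex.right _ ((Int.toNat_lt_toNat (Int.sub_pos.mpr hi)).mpr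
      (sub_lt_sub_left (lt_add_one i) l))

-- A's outer `while flag is True` loop.  The fuel counter is a totality guard
-- only: every iteration with flag = true strictly shortens the formula
-- (theorem innerA_len below), so length+1 units of fuel are never exhausted.
def outerA : Nat → List Char → Bool → List Char
  | _, f, false => f
  | 0, f, true => f        -- unreachable fuel exhaustion
  | Nat.succ n, f, true =>
    let r := innerA f (-1) false (f.length : Int) 0 false
    outerA n r.1 r.2

def remove_empty_parenthesis (formula : String) : String :=
  String.mk (outerA (formula.toList.length + 1) formula.toList true)

-- ===== PORT B =====

-- one step of Source B's loop; state = (out, stack of (pos, parent clean), clean)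
def stepB (st : List Char × List (Nat × Bool) × Bool) (c : Char) :
    List Char × List (Nat × Bool) × Bool :=
  match st with
  | (out, stack, clean) =>
    if c = '(' then (out ++ [c], (out.length, clean) :: stack, true)
    else if c = ')' then
      match stack, clean with
      | (pos, pc) :: rest, true => (out.take pos, rest, pc)   -- pop: drop the group
      | _, _ => (out ++ [c], stack, false)                    -- ')' ≠ ' ': clean = False
    else (out ++ [c], stack, if c = ' ' then clean else false)

def remove_empty_parenthesis_alt (formula : String) : String :=
  String.mk (formula.toList.foldl stepB ([], [], false)).1

-- ===== PRECONDITION & SPEC =====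
def Spec_remove_empty_parenthesis (formula : String) (out : String) : Prop := out = remove_empty_parenthesis_alt formula
instance (formula : String) (out : String) : Decidable (Spec_remove_empty_parenthesis formula out) := by unfold Spec_remove_empty_parenthesis; infer_instance

-- ===== CLAIM (what is proved, stated in full; the proofs are below) =====
def Claim_equal_remove_empty_parenthesis : Prop := ∀ (formula : String), Dom_remove_empty_parenthesis formula → Spec_remove_empty_parenthesis formula (remove_empty_parenthesis formula)

-- ===== LEMMAS AND PROOFS =====

-- one-step unfolding equations for innerA
theorem innerA_eq_stop {f : List Char} {start : Int} {found : Bool} {l i : Int} {flag : Bool}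
    (hi : ¬ i < l) : innerA f start found l i flag = (f, flag) := by
  rw [innerA, dif_neg hi]

theorem innerA_eq_none {f : List Char} {start : Int} {found : Bool} {l i : Int} {flag : Bool}
    (hi : i < l) (heq : PySem.List.pyGet? f i = none) :
    innerA f start found l i flag = (f, flag) := by
  rw [innerA, dif_pos hi, heq]

theorem innerA_eq_open {f : List Char} {start : Int} {found : Bool} {l i : Int} {flag : Bool}
    (hi : i < l) (heq : PySem.List.pyGet? f i = some '(') :
    innerA f start found l i flag = innerA f i true l (i + 1) flag := by
  rw [innerA, dif_pos hi, heq]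
  split
  next h => cases h
  next u hu =>
    cases hu
    rw [if_pos rfl]

theorem innerA_eq_rem {f : List Char} {start : Int} {found : Bool} {l i : Int} {flag : Bool}
    (hi : i < l) (heq : PySem.List.pyGet? f i = some ')') (hfd : found = true)
    (hlen : (PySem.List.slice f (some 0) (some start) ++ PySem.List.slice f (some (i+1)) none).length < f.length) :
    innerA f start found l i flag =
      innerA (PySem.List.slice f (some 0) (some start) ++ PySem.List.slice f (some (i+1)) none)
        start false ((PySem.List.slice f (some 0) (some start) ++ PySem.List.slice f (some (i+1)) none).length : Int) start true := by
  rw [innerA, dif_pos hi, heq]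
  split
  next h => cases h
  next u hu =>
    cases hu
    rw [if_neg (by decide : ¬ (')' = '(')), if_pos ⟨rfl, hfd⟩, dif_pos hlen]

theorem innerA_eq_rem_bad {f : List Char} {start : Int} {found : Bool} {l i : Int} {flag : Bool}
    (hi : i < l) (heq : PySem.List.pyGet? f i = some ')') (hfd : found = true)
    (hlen : ¬ (PySem.List.slice f (some 0) (some start) ++ PySem.List.slice f (some (i+1)) none).length < f.length) :
    innerA f start found l i flag = (f, flag) := by
  rw [innerA, dif_pos hi, heq]
  split
  next h => cases h
  next u hu =>
    cases hu
    rw [if_neg (by decide : ¬ (')' = '(')), if_pos ⟨rfl, hfd⟩, dif_neg hlen]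

theorem innerA_eq_nonspace {f : List Char} {start : Int} {found : Bool} {l i : Int} {flag : Bool}
    {unit : Char} (hi : i < l) (heq : PySem.List.pyGet? f i = some unit)
    (h1 : ¬ unit = '(') (h2 : ¬ (unit = ')' ∧ found = true)) (h3 : unit ≠ ' ') :
    innerA f start found l i flag = innerA f start false l (i + 1) flag := by
  rw [innerA, dif_pos hi, heq]
  split
  next h => cases h
  next u hu =>
    cases hu
    rw [if_neg h1, if_neg h2, if_pos h3]

theorem innerA_eq_space {f : List Char} {start : Int} {found : Bool} {l i : Int} {flag : Bool}
    (hi : i < l) (heq : PySem.List.pyGet? f i = some ' ') :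
    innerA f start found l i flag = innerA f start found l (i + 1) flag := by
  rw [innerA, dif_pos hi, heq]
  split
  next h => cases h
  next u hu =>
    cases hu
    rw [if_neg (by decide : ¬ (' ' = '(')), if_neg (fun h => by exact absurd h.1 (by decide)),
        if_neg (by simp : ¬ (' ' ≠ ' '))]


-- the scan never lengthens the formula, and a result flag `true` from input
-- flag `false` means it strictly shortened it (so length+1 fuel suffices)
theorem innerA_len (f : List Char) (start : Int) (found : Bool) (l i : Int) (flag : Bool) :
    (innerA f start found l i flag).1.length ≤ f.length ∧
      ((innerA f start found l i flag).2 = true → flag = true ∨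
        (innerA f start found l i flag).1.length < f.length) := by
  induction f, start, found, l, i, flag using innerA.induct with
  | case1 f start found l i flag hi heq =>
    rw [innerA_eq_none hi heq]; simp
  | case2 f start found l i flag hi heq ih =>
    rw [innerA_eq_open hi heq]; exact ih
  | case3 f start found l i flag hi unit heq hopen hclose f' hlen ih =>
    rw [innerA_eq_rem hi (hclose.1 ▸ heq) hclose.2 hlen]
    exact ⟨le_of_lt (lt_of_le_of_lt ih.1 hlen), fun _ => Or.inr (lt_of_le_of_lt ih.1 hlen)⟩
  | case4 f start found l i flag hi unit heq hopen hclose f' hlen =>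
    rw [innerA_eq_rem_bad hi (hclose.1 ▸ heq) hclose.2 hlen]; simp
  | case5 f start found l i flag hi unit heq hopen hclose hsp ih =>
    rw [innerA_eq_nonspace hi heq hopen hclose hsp]; exact ih
  | case6 f start found l i flag hi unit heq hopen hclose hsp ih =>
    rw [innerA_eq_space hi ((by simpa using hsp : unit = ' ') ▸ heq)]; exact ih
  | case7 f start found l i flag hi =>
    rw [innerA_eq_stop hi]; simp


-- invariant of A's inner scan: i ≥ 0 and, when found holds, start marks a '('
-- followed by spaces only up to position i
def InvA (f : List Char) (start : Int) (found : Bool) (i : Int) : Prop :=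
  0 ≤ i ∧ (found = true → 0 ≤ start ∧ start < i ∧
    f[start.toNat]? = some '(' ∧
    ∀ j : Nat, start.toNat < j → j < i.toNat → f[j]? = some ' ')

theorem foldl_spaces (s : List Char) (hs : ∀ c ∈ s, c = ' ') (out : List Char)
    (stack : List (Nat × Bool)) :
    List.foldl stepB (out, stack, true) s = (out ++ s, stack, true) := by
  induction s generalizing out with
  | nil => simp
  | cons c s ih =>
    have hc : c = ' ' := hs c (by simp)
    have h1 : stepB (out, stack, true) c = (out ++ [c], stack, true) := by
      simp [stepB, hc]
    rw [List.foldl_cons, h1, ih (fun d hd => hs d (by simp [hd]))]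
    simp

-- processing '(' ++ spaces ++ ')' returns B to the state it started from
theorem foldl_group (s : List Char) (hs : ∀ c ∈ s, c = ' ')
    (st : List Char × List (Nat × Bool) × Bool) :
    List.foldl stepB st ('(' :: (s ++ [')'])) = st := by
  obtain ⟨out, stack, clean⟩ := st
  have h1 : stepB (out, stack, clean) '(' =
      (out ++ ['('], (out.length, clean) :: stack, true) := by simp [stepB]
  have h2 : stepB (out ++ ['('] ++ s, (out.length, clean) :: stack, true) ')' =
      (out, stack, clean) := by
    simp only [stepB]
    rw [if_neg (by decide : ¬ ((')' : Char) = '('))]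
    simp only [if_true, List.append_assoc, List.take_left]
  rw [List.foldl_cons, h1, List.foldl_append, foldl_spaces s hs, List.foldl_cons,
      List.foldl_nil, h2]

-- hence cutting such a group out of the input does not change B's fold
theorem foldl_skip (x s y : List Char) (hs : ∀ c ∈ s, c = ' ')
    (st : List Char × List (Nat × Bool) × Bool) :
    List.foldl stepB st (x ++ ('(' :: (s ++ [')'])) ++ y) =
      List.foldl stepB st (x ++ y) := by
  rw [List.foldl_append, List.foldl_append, foldl_group s hs, List.foldl_append]

-- the decomposition of f at a removal site
theorem decomp (f : List Char) (s i : Nat) (hsi : s < i) (hi : i < f.length)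
    (hopen : f[s]? = some '(') (hclose : f[i]? = some ')')
    (hmid : ∀ j : Nat, s < j → j < i → f[j]? = some ' ') :
    f = f.take s ++ ('(' :: ((f.drop (s+1)).take (i - s - 1) ++ [')'])) ++ f.drop (i+1) ∧
      ∀ c ∈ (f.drop (s+1)).take (i - s - 1), c = ' ' := by
  have hs : s < f.length := lt_trans hsi hi
  constructor
  · set m := (f.drop (s+1)).take (i - s - 1) with hm
    conv_lhs => rw [← List.take_append_drop s f]
    rw [List.drop_eq_getElem_cons hs]
    have h2 : f.drop (s+1) = m ++ f.drop i := by
      rw [hm]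
      conv_lhs => rw [← List.take_append_drop (i - s - 1) (f.drop (s+1))]
      rw [List.drop_drop]
      congr 2
      omega
    rw [h2, List.drop_eq_getElem_cons hi]
    have e1 : f[s] = '(' := by
      have := List.getElem?_eq_getElem hs
      rw [hopen] at this; exact (Option.some.inj this).symm
    have e2 : f[i] = ')' := by
      have := List.getElem?_eq_getElem hi
      rw [hclose] at this; exact (Option.some.inj this).symm
    rw [e1, e2]; simp
  · intro c hc
    rw [List.mem_iff_getElem] at hc
    obtain ⟨j, hj, hcj⟩ := hc
    have hjt : j < i - s - 1 := by
      have := hj; simp [List.length_take] at this; omega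
    rw [List.getElem_take, List.getElem_drop] at hcj
    have := hmid (s + 1 + j) (by omega) (by omega)
    have h3 : f[s+1+j]? = some c := by
      rw [List.getElem?_eq_getElem (by omega : s + 1 + j < f.length)]
      exact congrArg some hcj
    rw [this] at h3; exact (Option.some.inj h3).symm

-- turning pyGet? into a getElem? fact
theorem pyGet?_toNat (f : List Char) (i : Int) (hi0 : 0 ≤ i) :
    PySem.List.pyGet? f i = f[i.toNat]? := by
  have h := PySem.List.pyGet?_natCast f i.toNat
  rw [show ((i.toNat : Nat) : Int) = i by omega] at h
  exact h

-- from the invariant at a removal site: the two slices are f with the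
-- space-only group cut out, and the result is strictly shorter
theorem removal_shape (f : List Char) (start i : Int) (hinv : InvA f start true i)
    (hil : i < (f.length : Int)) (hclose : PySem.List.pyGet? f i = some ')') :
    (PySem.List.slice f (some 0) (some start) ++ PySem.List.slice f (some (i+1)) none)
        = f.take start.toNat ++ f.drop (i.toNat + 1) ∧
      f = f.take start.toNat ++
          ('(' :: ((f.drop (start.toNat+1)).take (i.toNat - start.toNat - 1) ++ [')'])) ++
          f.drop (i.toNat + 1) ∧
      (∀ c ∈ (f.drop (start.toNat+1)).take (i.toNat - start.toNat - 1), c = ' ') ∧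
      (f.take start.toNat ++ f.drop (i.toNat + 1)).length < f.length := by
  obtain ⟨hi0, hf⟩ := hinv
  obtain ⟨hst0, hsti, hopen, hmid⟩ := hf rfl
  have hilen : i.toNat < f.length := by omega
  have hsilt : start.toNat < i.toNat := by omega
  have hcl : f[i.toNat]? = some ')' := by
    rw [← pyGet?_toNat f i hi0, hclose]
  have hd := decomp f start.toNat i.toNat hsilt hilen hopen hcl hmid
  have hslice : (PySem.List.slice f (some 0) (some start) ++
      PySem.List.slice f (some (i+1)) none) = f.take start.toNat ++ f.drop (i.toNat+1) := by
    rw [PySem.List.slice_zero_start f, PySem.List.slice_to f hst0,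
        PySem.List.slice_from f (by omega : (0:Int) ≤ i + 1)]
    congr 2
    omega
  refine ⟨hslice, hd.1, hd.2, ?_⟩
  have hlen := congrArg List.length hd.1
  simp at hlen ⊢
  omega

-- the scan's removals preserve B's fold from any state
theorem innerA_foldl : ∀ (f : List Char) (start : Int) (found : Bool) (l i : Int)
    (flag : Bool), l = (f.length : Int) → InvA f start found i →
    ∀ st, List.foldl stepB st (innerA f start found l i flag).1 =
      List.foldl stepB st f := by
  intro f start found l i flag
  induction f, start, found, l, i, flag using innerA.induct with
  | case1 f start found l i flag hi heq =>
    intro hl hinv st; rw [innerA_eq_none hi heq]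
  | case2 f start found l i flag hi heq ih =>
    intro hl hinv st
    rw [innerA_eq_open hi heq]
    have hi0 : (0:Int) ≤ i := hinv.1
    apply ih hl _ st
    refine ⟨by omega, fun _ => ⟨hi0, by omega, ?_, fun j h1 h2 => absurd h2 (by omega)⟩⟩
    rw [← pyGet?_toNat f i hi0, heq]
  | case3 f start found l i flag hi unit heq hopen hclose f' hlen ih =>
    intro hl hinv st
    rw [innerA_eq_rem hi (hclose.1 ▸ heq) hclose.2 hlen]
    have hfd : found = true := hclose.2
    subst hfd
    obtain ⟨hslice, hdec, hsp, _⟩ :=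
      removal_shape f start i hinv (by omega) (hclose.1 ▸ heq)
    have hff : f' = List.take start.toNat f ++ List.drop (i.toNat + 1) f := hslice
    rw [ih rfl ⟨(hinv.2 rfl).1, by simp⟩ st, hff]
    conv_rhs => rw [hdec]
    exact (foldl_skip _ _ _ hsp st).symm
  | case4 f start found l i flag hi unit heq hopen hclose f' hlen =>
    intro hl hinv st
    -- the length guard cannot fail: the removal strictly shortens f
    exfalso
    have hfd : found = true := hclose.2
    subst hfd
    obtain ⟨hslice, _, _, hstrict⟩ :=
      removal_shape f start i hinv (by omega) (hclose.1 ▸ heq)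
    refine hlen ?_
    show (PySem.List.slice f (some 0) (some start) ++
        PySem.List.slice f (some (i+1)) none).length < f.length
    rw [hslice]
    exact hstrict
  | case5 f start found l i flag hi unit heq hopen hclose hsp ih =>
    intro hl hinv st
    rw [innerA_eq_nonspace hi heq hopen hclose hsp]
    have hi0 : (0:Int) ≤ i := hinv.1
    exact ih hl ⟨by omega, by simp⟩ st
  | case6 f start found l i flag hi unit heq hopen hclose hsp ih =>
    intro hl hinv st
    have hsp' : unit = ' ' := by simpa using hsp
    subst hsp'
    have hi0 : (0:Int) ≤ i := hinv.1
    rw [innerA_eq_space hi heq]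
    apply ih hl _ st
    refine ⟨by omega, fun hfd => ?_⟩
    obtain ⟨h1, h2, h3, h4⟩ := hinv.2 hfd
    refine ⟨h1, by omega, h3, fun j hj1 hj2 => ?_⟩
    by_cases hji : j < i.toNat
    · exact h4 j hj1 hji
    · have hj : j = i.toNat := by omega
      subst hj
      rw [← pyGet?_toNat f i hinv.1, heq]
  | case7 f start found l i flag hi =>
    intro _ _ st; rw [innerA_eq_stop hi]

-- once flag is true it stays true
theorem innerA_flag : ∀ (f : List Char) (start : Int) (found : Bool) (l i : Int)
    (flag : Bool), flag = true → (innerA f start found l i flag).2 = true := by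
  intro f start found l i flag
  induction f, start, found, l, i, flag using innerA.induct with
  | case1 f start found l i flag hi heq =>
    intro h; rw [innerA_eq_none hi heq]; exact h
  | case2 f start found l i flag hi heq ih =>
    intro h; rw [innerA_eq_open hi heq]; exact ih h
  | case3 f start found l i flag hi unit heq hopen hclose f' hlen ih =>
    intro h
    rw [innerA_eq_rem hi (hclose.1 ▸ heq) hclose.2 hlen]
    exact ih rfl
  | case4 f start found l i flag hi unit heq hopen hclose f' hlen =>
    intro h; rw [innerA_eq_rem_bad hi (hclose.1 ▸ heq) hclose.2 hlen]; exact h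
  | case5 f start found l i flag hi unit heq hopen hclose hsp ih =>
    intro h; rw [innerA_eq_nonspace hi heq hopen hclose hsp]; exact ih h
  | case6 f start found l i flag hi unit heq hopen hclose hsp ih =>
    intro h
    rw [innerA_eq_space hi ((by simpa using hsp : unit = ' ') ▸ heq)]
    exact ih h
  | case7 f start found l i flag hi =>
    intro h; rw [innerA_eq_stop hi]; exact h

-- a scan that reports no removal leaves the formula unchanged
theorem innerA_id : ∀ (f : List Char) (start : Int) (found : Bool) (l i : Int)
    (flag : Bool), flag = false → (innerA f start found l i flag).2 = false →
    (innerA f start found l i flag).1 = f := by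
  intro f start found l i flag
  induction f, start, found, l, i, flag using innerA.induct with
  | case1 f start found l i flag hi heq =>
    intro _ _; rw [innerA_eq_none hi heq]
  | case2 f start found l i flag hi heq ih =>
    intro h0 h; rw [innerA_eq_open hi heq] at h ⊢; exact ih h0 h
  | case3 f start found l i flag hi unit heq hopen hclose f' hlen ih =>
    intro h0 h
    rw [innerA_eq_rem hi (hclose.1 ▸ heq) hclose.2 hlen] at h
    rw [innerA_flag _ _ _ _ _ _ rfl] at h
    exact absurd h (by simp)
  | case4 f start found l i flag hi unit heq hopen hclose f' hlen =>
    intro _ _; rw [innerA_eq_rem_bad hi (hclose.1 ▸ heq) hclose.2 hlen]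
  | case5 f start found l i flag hi unit heq hopen hclose hsp ih =>
    intro h0 h
    rw [innerA_eq_nonspace hi heq hopen hclose hsp] at h ⊢
    exact ih h0 h
  | case6 f start found l i flag hi unit heq hopen hclose hsp ih =>
    intro h0 h
    rw [innerA_eq_space hi ((by simpa using hsp : unit = ' ') ▸ heq)] at h ⊢
    exact ih h0 h
  | case7 f start found l i flag hi =>
    intro _ _; rw [innerA_eq_stop hi]

-- coupling: when the scan reports no removal, B's fold tracks it step for
-- step, never pops, and just copies the input to the output
theorem innerA_couple : ∀ (f : List Char) (start : Int) (found : Bool) (l i : Int)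
    (flag : Bool), flag = false → l = (f.length : Int) → InvA f start found i →
    (innerA f start found l i flag).2 = false →
    ∀ stack, (List.foldl stepB (f.take i.toNat, stack, found) (f.drop i.toNat)).1 = f := by
  intro f start found l i flag
  induction f, start, found, l, i, flag using innerA.induct with
  | case1 f start found l i flag hi heq =>
    -- pyGet? = none is impossible: 0 ≤ i < l = f.length
    intro h0 hl hinv hfl stack
    exfalso
    have hi0 : (0:Int) ≤ i := hinv.1
    have h := pyGet?_toNat f i hi0
    rw [heq] at h
    have hit : i.toNat < f.length := by omega
    rw [List.getElem?_eq_getElem hit] at h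
    exact absurd h (by simp)
  | case2 f start found l i flag hi heq ih =>
    intro h0 hl hinv hfl stack
    rw [innerA_eq_open hi heq] at hfl
    have hi0 : (0:Int) ≤ i := hinv.1
    have hit : i.toNat < f.length := by omega
    have hchar : f[i.toNat] = '(' := by
      have h := pyGet?_toNat f i hi0
      rw [heq, List.getElem?_eq_getElem hit] at h
      exact Option.some.inj h.symm
    rw [List.drop_eq_getElem_cons hit, List.foldl_cons, hchar]
    have hstep : stepB (f.take i.toNat, stack, found) '(' =
        (f.take i.toNat ++ ['('], ((f.take i.toNat).length, found) :: stack, true) := by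
      simp [stepB]
    rw [hstep]
    have htake : f.take i.toNat ++ ['('] = f.take (i.toNat + 1) := by
      rw [← hchar]; exact List.take_append_getElem hit
    have hnat : i.toNat + 1 = (i+1).toNat := by omega
    rw [htake, hnat]
    apply ih h0 hl _ hfl
    refine ⟨by omega, fun _ => ⟨hi0, by omega, ?_, fun j h1 h2 => absurd h2 (by omega)⟩⟩
    rw [List.getElem?_eq_getElem hit, hchar]
  | case3 f start found l i flag hi unit heq hopen hclose f' hlen ih =>
    intro h0 hl hinv hfl stack
    rw [innerA_eq_rem hi (hclose.1 ▸ heq) hclose.2 hlen] at hfl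
    rw [innerA_flag _ _ _ _ _ _ rfl] at hfl
    exact absurd hfl (by simp)
  | case4 f start found l i flag hi unit heq hopen hclose f' hlen =>
    -- the length guard cannot fail: the removal strictly shortens f
    intro h0 hl hinv hfl stack
    exfalso
    have hfd : found = true := hclose.2
    subst hfd
    obtain ⟨hslice, _, _, hstrict⟩ :=
      removal_shape f start i hinv (by omega) (hclose.1 ▸ heq)
    refine hlen ?_
    show (PySem.List.slice f (some 0) (some start) ++
        PySem.List.slice f (some (i+1)) none).length < f.length
    rw [hslice]
    exact hstrict
  | case5 f start found l i flag hi unit heq hopen hclose hsp ih =>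
    intro h0 hl hinv hfl stack
    rw [innerA_eq_nonspace hi heq hopen hclose hsp] at hfl
    have hi0 : (0:Int) ≤ i := hinv.1
    have hit : i.toNat < f.length := by omega
    have hchar : f[i.toNat] = unit := by
      have h := pyGet?_toNat f i hi0
      rw [heq, List.getElem?_eq_getElem hit] at h
      exact Option.some.inj h.symm
    rw [List.drop_eq_getElem_cons hit, List.foldl_cons, hchar]
    have hstep : stepB (f.take i.toNat, stack, found) unit =
        (f.take i.toNat ++ [unit], stack, false) := by
      by_cases hr : unit = ')'
      · subst hr
        have hfd : found = false := by
          cases hb : found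
          · rfl
          · exact absurd ⟨rfl, hb⟩ hclose
        subst hfd
        rcases stack with _ | ⟨⟨p1, p2⟩, rest⟩ <;> simp [stepB]
      · simp [stepB, hopen, hr, hsp]
    rw [hstep]
    have htake : f.take i.toNat ++ [unit] = f.take (i.toNat + 1) := by
      rw [← hchar]; exact List.take_append_getElem hit
    have hnat : i.toNat + 1 = (i+1).toNat := by omega
    rw [htake, hnat]
    exact ih h0 hl ⟨by omega, by simp⟩ hfl stack
  | case6 f start found l i flag hi unit heq hopen hclose hsp ih =>
    intro h0 hl hinv hfl stack
    have hsp' : unit = ' ' := by simpa using hsp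
    subst hsp'
    rw [innerA_eq_space hi heq] at hfl
    have hi0 : (0:Int) ≤ i := hinv.1
    have hit : i.toNat < f.length := by omega
    have hchar : f[i.toNat] = ' ' := by
      have h := pyGet?_toNat f i hi0
      rw [heq, List.getElem?_eq_getElem hit] at h
      exact Option.some.inj h.symm
    rw [List.drop_eq_getElem_cons hit, List.foldl_cons, hchar]
    have hstep : stepB (f.take i.toNat, stack, found) ' ' =
        (f.take i.toNat ++ [' '], stack, found) := by
      simp [stepB]
    rw [hstep]
    have htake : f.take i.toNat ++ [' '] = f.take (i.toNat + 1) := by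
      rw [← hchar]; exact List.take_append_getElem hit
    have hnat : i.toNat + 1 = (i+1).toNat := by omega
    rw [htake, hnat]
    apply ih h0 hl _ hfl
    refine ⟨by omega, fun hfd => ?_⟩
    obtain ⟨h1, h2, h3, h4⟩ := hinv.2 hfd
    refine ⟨h1, by omega, h3, fun j hj1 hj2 => ?_⟩
    by_cases hji : j < i.toNat
    · exact h4 j hj1 hji
    · have hj : j = i.toNat := by omega
      subst hj
      rw [List.getElem?_eq_getElem hit, hchar]
  | case7 f start found l i flag hi =>
    intro h0 hl hinv hfl stack
    have hi0 : (0:Int) ≤ i := hinv.1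
    have hit : f.length ≤ i.toNat := by omega
    rw [List.drop_eq_nil_of_le hit, List.take_of_length_le hit]
    simp

-- A's outer loop equals B's single fold (any sufficient fuel)
theorem outerA_eq_fold : ∀ (n : Nat) (f : List Char), f.length < n →
    outerA n f true = (List.foldl stepB ([], [], false) f).1 := by
  intro n
  induction n with
  | zero => intro f hf; omega
  | succ n ih =>
    intro f hf
    rw [outerA]
    have hinv : InvA f (-1) false 0 := ⟨le_refl 0, by simp⟩
    rcases h2 : (innerA f (-1) false (f.length : Int) 0 false).2 with _ | _
    · rw [outerA]
      rw [innerA_id f (-1) false (f.length : Int) 0 false rfl h2]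
      have hc := innerA_couple f (-1) false (f.length : Int) 0 false rfl rfl hinv h2 []
      simpa using hc.symm
    · rcases (innerA_len f (-1) false (f.length : Int) 0 false).2 h2 with h | h
      · exact absurd h (by simp)
      · rw [ih _ (by omega)]
        rw [innerA_foldl f (-1) false (f.length : Int) 0 false rfl hinv ([], [], false)]

-- ===== VERDICT (by name: the statement is the Claim_ definition above) =====
theorem remove_empty_parenthesis_spec : Claim_equal_remove_empty_parenthesis := by
  intro formula _
  unfold Spec_remove_empty_parenthesis remove_empty_parenthesis remove_empty_parenthesis_alt
  rw [outerA_eq_fold _ _ (by omega)]
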